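-- pv_equiv track=rewrite | github.com/milena-roehrs/BOIS-with-immediate-sharing | pauli_handling.py | twopaulis
-- ===== SOURCE A (Python) =====
-- import copy
--
-- def twopaulis(list1, list2):
--     """
--     Compares two lists and creates a new list that combines the unique elements from both lists.
--     Additionally, it returns a mapping list that indicates the index of each element in the new list.
--
--         Parameters:
--             list1 (list): The first list to be compared.
--             list2 (list): The second list to be compared.
--
--         Returns:
--             tuple: A tuple containing two elements:
--                 - list3 (list): The new list that combines the unique elements from both input lists.
--                 - mapping (list): A list of indices that maps the elements in list2 to their corresponding
--                 positions in list3.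
--     """
--
--     mapping = []
--     list3 = copy.deepcopy(list1)
--     for wl in list2:
--         found = False
--         indx = 0
--         laenge = len(list3)
--         while (not found) and (indx < laenge):
--             if wl == list3[indx]:
--                 found = True
--                 mapping.append(indx)
--             else:
--                 indx += 1
--
--         if (not found):
--             list3.append(wl)
--             mapping.append(laenge)
--
--     return list3, mapping
-- ===== SOURCE B (Python) =====
-- def twopaulis(list1, list2):
--     # Staged computation: (1) build the combined list up front by appending the
--     # unseen elements of list2 (order of first appearance), (2) build a
--     # value -> first-index table of the finished combined list in one
--     # comprehension, (3) the mapping is then a pure lookup pass over list2.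
--     # Correct because indices of elements already present never change when
--     # elements are only appended, so the first index in the FINAL list equals
--     # the index A records at processing time.
--     seen = set(list1)
--     extras = []
--     for wl in list2:
--         if wl not in seen:
--             seen.add(wl)
--             extras.append(wl)
--     list3 = list1 + extras
--     pos = {v: i for i, v in reversed(list(enumerate(list3)))}
--     mapping = [pos[wl] for wl in list2]
--     return list3, mapping
-- ===== Notes on version B (the rewrite author's own statement) =====
-- stated objective: faster
-- what changed: Replaced A's interleaved per-element linear scan with three staged passes: a set-filtered pass that builds the whole combined list first, a reversed-enumerate dict comprehension giving first indices of that finished list, and a final pure lookup pass producing the mapping.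
import Mathlib
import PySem

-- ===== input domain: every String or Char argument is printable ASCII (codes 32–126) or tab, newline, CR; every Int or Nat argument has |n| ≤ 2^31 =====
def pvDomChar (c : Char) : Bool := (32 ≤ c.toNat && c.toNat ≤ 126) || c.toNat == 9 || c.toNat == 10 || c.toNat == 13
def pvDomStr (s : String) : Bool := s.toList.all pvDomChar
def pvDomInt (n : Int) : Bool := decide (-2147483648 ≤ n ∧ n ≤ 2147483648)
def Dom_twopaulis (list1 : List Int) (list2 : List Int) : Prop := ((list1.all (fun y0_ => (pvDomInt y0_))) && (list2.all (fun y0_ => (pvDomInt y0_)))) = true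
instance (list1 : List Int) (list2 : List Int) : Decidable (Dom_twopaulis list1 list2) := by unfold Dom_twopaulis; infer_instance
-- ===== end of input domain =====

-- B replaces A's interleaved per-element linear scan with three staged passes:
-- combined list first, then a value→first-index table of the finished list,
-- then a pure lookup pass for the mapping (objective: faster).

-- ===== PORT A =====
-- the inner `while (not found) and (indx < laenge)` loop: index where wl is found, or none
def twopaulisFind (wl : Int) (list3 : List Int) (laenge : Nat) (indx : Nat) : Option Nat :=
  if indx < laenge then
    if PySem.List.pyGet? list3 (indx : Int) = some wl then some indx
    else twopaulisFind wl list3 laenge (indx + 1)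
  else none
termination_by laenge - indx

-- the outer `for wl in list2` loop over the state (list3, mapping)
def twopaulisLoop (l2 : List Int) (list3 : List Int) (mapping : List Int) : List Int × List Int :=
  match l2 with
  | [] => (list3, mapping)
  | wl :: rest =>
    let laenge := list3.length
    match twopaulisFind wl list3 laenge 0 with
    | some indx => twopaulisLoop rest list3 (mapping ++ [(indx : Int)])
    | none => twopaulisLoop rest (list3 ++ [wl]) (mapping ++ [(laenge : Int)])

def twopaulis (list1 : List Int) (list2 : List Int) : List Int × List Int :=
  twopaulisLoop list2 list1 []

-- ===== PORT B =====
-- pass 1: `for wl in list2: if wl not in seen: seen.add(wl); extras.append(wl)`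
def twopaulisAltExtras (l2 : List Int) (seen : PySem.Set Int) (extras : List Int) : List Int :=
  match l2 with
  | [] => extras
  | wl :: rest =>
    if PySem.Set.contains seen wl then twopaulisAltExtras rest seen extras
    else twopaulisAltExtras rest (PySem.Set.add seen wl) (extras ++ [wl])

-- pass 2: `pos = {v: i for i, v in reversed(list(enumerate(list3)))}`
def twopaulisAltPos (list3 : List Int) : PySem.Dict Int Int :=
  ((PySem.List.enumerate list3).reverse).foldl (fun d p => d.insert p.2 p.1) PySem.Dict.empty

-- pass 3: `[pos[wl] for wl in list2]`; Python's pos[wl] raises KeyError on a missing key,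
-- which never happens here (every wl of list2 is a key of pos) — ported with default 0,
-- exact on all reachable lookups.
def twopaulis_alt (list1 : List Int) (list2 : List Int) : List Int × List Int :=
  let extras := twopaulisAltExtras list2 (PySem.Set.ofList list1) []
  let list3 := list1 ++ extras
  let pos := twopaulisAltPos list3
  (list3, list2.map (fun wl => (pos.get? wl).getD 0))

-- ===== PRECONDITION & SPEC =====
def Spec_twopaulis (list1 : List Int) (list2 : List Int) (out : List Int × List Int) : Prop := out = twopaulis_alt list1 list2
instance (list1 : List Int) (list2 : List Int) (out : List Int × List Int) : Decidable (Spec_twopaulis list1 list2 out) := by unfold Spec_twopaulis; infer_instance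

-- ===== CLAIM =====
def Claim_equal_twopaulis : Prop := ∀ (list1 : List Int) (list2 : List Int), Dom_twopaulis list1 list2 → Spec_twopaulis list1 list2 (twopaulis list1 list2)

-- ===== LEMMAS AND PROOFS =====

-- the combined list both programs produce, as a reference recursion
def finalL (l2 : List Int) (l3 : List Int) : List Int :=
  match l2 with
  | [] => l3
  | wl :: rest => finalL rest (if wl ∈ l3 then l3 else l3 ++ [wl])

-- first-occurrence index after appending one element
lemma idxOf?_append_singleton (l : List Int) (x v : Int) :
    (l ++ [x]).idxOf? v =
      ((l.idxOf? v).or (if v = x then some l.length else none)) := by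
  induction l with
  | nil =>
      cases eq_or_ne v x with
      | inl h => subst h; simp [List.idxOf?_cons]
      | inr h => simp [List.idxOf?_cons, h, Ne.symm h]
  | cons a as ih =>
      rw [List.cons_append, List.idxOf?_cons, List.idxOf?_cons, ih]
      by_cases h : a = v
      · simp [h]
      · have hb : (a == v) = false := by simpa using h
        simp only [hb, Bool.false_eq_true, if_false, Option.map_or]
        by_cases hx : v = x
        · simp [hx]
        · simp [hx]

-- first-occurrence index is stable under appending a tail, once the value occurs
lemma idxOf?_append_left (l t : List Int) (v : Int) (hv : v ∈ l) :
    (l ++ t).idxOf? v = l.idxOf? v := by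
  induction l with
  | nil => cases hv
  | cons a as ih =>
      rw [List.cons_append, List.idxOf?_cons, List.idxOf?_cons]
      by_cases h : a = v
      · simp [h]
      · have hb : (a == v) = false := by simpa using h
        have hv' : v ∈ as := by
          cases hv with
          | head => exact absurd rfl h
          | tail _ h2 => exact h2
        simp [hb, ih hv']

-- finalL only appends to l3
lemma finalL_prefix (l2 : List Int) : ∀ l3 : List Int, ∃ t, finalL l2 l3 = l3 ++ t := by
  induction l2 with
  | nil => intro l3; exact ⟨[], by simp [finalL]⟩
  | cons wl rest ih =>
      intro l3
      rw [finalL]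
      by_cases h : wl ∈ l3
      · simpa [h] using ih l3
      · obtain ⟨t, ht⟩ := ih (l3 ++ [wl])
        exact ⟨wl :: t, by simp [h, ht]⟩

-- A's while loop computes the first index ≥ j of wl in list3
lemma twopaulisFind_eq (wl : Int) (l3 : List Int) :
    ∀ j : Nat, twopaulisFind wl l3 l3.length j = ((l3.drop j).idxOf? wl).map (· + j) := by
  intro j
  induction hn : l3.length - j using Nat.strong_induction_on generalizing j with
  | _ n ih =>
    rw [twopaulisFind]
    by_cases h : j < l3.length
    · have hdrop : l3.drop j = l3[j] :: l3.drop (j + 1) := List.drop_eq_getElem_cons h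
      rw [if_pos h, hdrop]
      by_cases he : PySem.List.pyGet? l3 (j : Int) = some wl
      · have : l3[j] = wl := by
          simpa [PySem.List.pyGet?_natCast, h] using he
        simp [he, List.idxOf?_cons, this]
      · have hne : ¬ l3[j] = wl := by
          intro hc; apply he; simp [h, hc]
        rw [if_neg he, ih (l3.length - (j+1)) (by omega) (j+1) rfl]
        rw [List.idxOf?_cons, if_neg (by simpa using hne)]
        cases List.idxOf? wl (l3.drop (j+1)) with
        | none => simp
        | some k => simp; omega
    · rw [if_neg h]
      have : l3.drop j = [] := List.drop_eq_nil_of_le (by omega)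
      simp [this]

-- the lookup function both mappings are built from
def finalIdx (l : List Int) (wl : Int) : Int :=
  ((l.idxOf? wl).map (fun n => (n : Int))).getD 0

-- characterisation of A's outer loop via finalL / finalIdx
lemma twopaulisLoop_eq (l2 : List Int) : ∀ (l3 m : List Int),
    twopaulisLoop l2 l3 m = (finalL l2 l3, m ++ l2.map (finalIdx (finalL l2 l3))) := by
  induction l2 with
  | nil => intro l3 m; simp [twopaulisLoop, finalL]
  | cons wl rest ih =>
      intro l3 m
      rw [twopaulisLoop]
      have hfind := twopaulisFind_eq wl l3 0
      rw [List.drop_zero] at hfind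
      by_cases hmem : wl ∈ l3
      · obtain ⟨n, hn⟩ : ∃ n, l3.idxOf? wl = some n := by
          cases hp : l3.idxOf? wl with
          | none => exact absurd (List.idxOf?_eq_none_iff.mp hp) (by simp [hmem])
          | some n => exact ⟨n, rfl⟩
        rw [hfind, hn]
        simp only [Option.map_some, Nat.add_zero]
        rw [ih l3 (m ++ [(n : Int)])]
        have hfl : finalL (wl :: rest) l3 = finalL rest l3 := by rw [finalL, if_pos hmem]
        obtain ⟨t, ht⟩ := finalL_prefix rest l3
        have hidx : finalIdx (finalL rest l3) wl = (n : Int) := by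
          rw [finalIdx, ht, idxOf?_append_left _ _ _ hmem, hn]; rfl
        rw [hfl, List.map_cons, hidx, List.append_assoc]
        rfl
      · have hn : l3.idxOf? wl = none := List.idxOf?_eq_none_iff.mpr (by simp [hmem])
        rw [hfind, hn]
        simp only [Option.map_none]
        rw [ih (l3 ++ [wl]) (m ++ [(l3.length : Int)])]
        have hfl : finalL (wl :: rest) l3 = finalL rest (l3 ++ [wl]) := by
          rw [finalL, if_neg hmem]
        obtain ⟨t, ht⟩ := finalL_prefix rest (l3 ++ [wl])
        have hidx : finalIdx (finalL rest (l3 ++ [wl])) wl = (l3.length : Int) := by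
          rw [finalIdx, ht, idxOf?_append_left _ _ _ (by simp), idxOf?_append_singleton, hn]
          simp
        rw [hfl, List.map_cons, hidx, List.append_assoc]
        rfl

-- B's first pass produces exactly finalL
lemma altExtras_eq (l2 : List Int) : ∀ (seen : PySem.Set Int) (l3 extras base : List Int),
    l3 = base ++ extras → (∀ v, PySem.Set.contains seen v = true ↔ v ∈ l3) →
    base ++ twopaulisAltExtras l2 seen extras = finalL l2 l3 := by
  induction l2 with
  | nil =>
      intro seen l3 extras base h1 _
      rw [twopaulisAltExtras, finalL, h1]
  | cons wl rest ih =>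
      intro seen l3 extras base h1 h2
      rw [twopaulisAltExtras, finalL]
      by_cases hmem : wl ∈ l3
      · rw [if_pos ((h2 wl).mpr hmem), if_pos hmem]
        exact ih seen l3 extras base h1 h2
      · have hc : ¬ PySem.Set.contains seen wl = true := fun h => hmem ((h2 wl).mp h)
        rw [if_neg hc, if_neg hmem]
        apply ih _ (l3 ++ [wl]) (extras ++ [wl]) base (by rw [h1, List.append_assoc])
        intro v
        rw [PySem.Set.contains_iff, PySem.Set.mem_add]
        constructor
        · rintro (h | h)
          · exact List.mem_append_left _ ((h2 v).mp ((PySem.Set.contains_iff _ _).mpr h))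
          · subst h; simp
        · intro h
          rcases List.mem_append.mp h with h | h
          · exact Or.inl ((PySem.Set.contains_iff _ _).mp ((h2 v).mpr h))
          · exact Or.inr (by simpa using h)

-- B's second pass is the first-occurrence index table of its argument
lemma posFold_get? (l : List Int) : ∀ (off : Int) (d0 : PySem.Dict Int Int) (v : Int),
    (((PySem.List.enumerate l off).reverse).foldl (fun d p => d.insert p.2 p.1) d0).get? v
      = ((l.idxOf? v).map (fun n => (n : Int) + off)).or (d0.get? v) := by
  induction l with
  | nil => intro off d0 v; simp [PySem.List.enumerate_nil]
  | cons a as ih =>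
      intro off d0 v
      rw [PySem.List.enumerate_cons, List.reverse_cons, List.foldl_append]
      simp only [List.foldl_cons, List.foldl_nil]
      by_cases hv : v = a
      · subst hv
        rw [PySem.Dict.get?_insert_self, List.idxOf?_cons]
        simp
      · rw [PySem.Dict.get?_insert_of_ne _ _ hv, ih (off + 1) d0 v, List.idxOf?_cons,
          if_neg (by simpa using fun h => hv h.symm)]
        cases List.idxOf? v as with
        | none => simp
        | some n =>
            simp only [Option.map_some, Option.bind_eq_bind, Option.bind_some, Option.pure_def]
            congr 2
            push_cast
            ring

lemma altPos_get? (l : List Int) (v : Int) :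
    (twopaulisAltPos l).get? v = (l.idxOf? v).map (fun n => (n : Int)) := by
  rw [twopaulisAltPos, posFold_get? l 0 PySem.Dict.empty v]
  simp [PySem.Dict.get?_empty]

-- ===== VERDICT =====
theorem twopaulis_spec : Claim_equal_twopaulis := by
  intro list1 list2 _
  unfold Spec_twopaulis twopaulis twopaulis_alt
  rw [twopaulisLoop_eq]
  have hext : list1 ++ twopaulisAltExtras list2 (PySem.Set.ofList list1) [] = finalL list2 list1 := by
    apply altExtras_eq list2 (PySem.Set.ofList list1) list1 [] list1 (by simp)
    intro v
    rw [PySem.Set.contains_iff, PySem.Set.mem_ofList]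
  simp only [hext, List.nil_append]
  congr 1
  apply List.map_congr_left
  intro wl _
  rw [altPos_get?, finalIdx]
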